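-- pv_equiv track=rewrite | github.com/Lasabito/planetarium | Planetarium/web/views.py | transform_to_list
-- ===== SOURCE A (Python) =====
-- def transform_to_list(string):
--     result = [[]]
--     for num in string:
--         if num != '|':
--             result[-1].append(int(num))
--         else:
--             result.append([])
--
--     return result
-- ===== SOURCE B (Python) =====
-- def transform_to_list(string):
--     return [[int(c) for c in part] for part in string.split('|')]
-- ===== Notes on version B (the rewrite author's own statement) =====
-- stated objective: idiomatic
-- what changed: Replaces the single-pass accumulator loop that mutates the last group in place with a split-then-parse decomposition: string.split('|') yields the groups, a nested comprehension converts each character to int.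
import Mathlib
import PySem

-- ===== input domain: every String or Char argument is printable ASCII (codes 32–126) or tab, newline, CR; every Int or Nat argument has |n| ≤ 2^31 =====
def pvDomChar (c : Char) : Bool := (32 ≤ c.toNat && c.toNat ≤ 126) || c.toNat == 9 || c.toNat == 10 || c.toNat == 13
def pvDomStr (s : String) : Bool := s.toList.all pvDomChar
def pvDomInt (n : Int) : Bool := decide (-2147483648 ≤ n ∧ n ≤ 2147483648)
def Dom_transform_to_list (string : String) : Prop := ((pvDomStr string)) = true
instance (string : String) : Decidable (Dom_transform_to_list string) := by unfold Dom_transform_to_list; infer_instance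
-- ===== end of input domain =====

-- B replaces A's one-pass mutate-the-last-group loop with split('|') followed by a nested
-- per-character int conversion (idiomatic decomposition; same return value on Pre_).

-- ===== PORT A =====
-- int(num) for a single character num (Pre_ guarantees num is a digit, so the ValueError case never fires)
def pvIntOfChar (c : Char) : Int := (PySem.Int.ofChars? [c]).getD 0

def transform_to_list (string : String) : List (List Int) :=
  string.toList.foldl
    (fun result num =>
      if num ≠ '|' then result.dropLast ++ [result.getLastD [] ++ [pvIntOfChar num]]
      else result ++ [[]])
    [[]]

-- ===== PORT B =====
def transform_to_list_alt (string : String) : List (List Int) :=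
  (PySem.Chars.splitOn string.toList ['|']).map (fun part => part.map (fun c => pvIntOfChar c))

-- ===== PRECONDITION & SPEC =====
-- A (and B alike) raise ValueError via int(c) on any character that is neither a digit nor the separator character; those inputs are excluded.
def Pre_transform_to_list (string : String) : Prop :=
  (string.toList.all (fun c => c == '|' || c.isDigit)) = true
instance (string : String) : Decidable (Pre_transform_to_list string) := by
  unfold Pre_transform_to_list; infer_instance

def pvWitness_transform_to_list : String := "12|3"

def Spec_transform_to_list (string : String) (out : List (List Int)) : Prop := out = transform_to_list_alt string
instance (string : String) (out : List (List Int)) : Decidable (Spec_transform_to_list string out) := by unfold Spec_transform_to_list; infer_instance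

-- ===== CLAIM (what is proved, stated in full; the proofs are below) =====
def Claim_equal_transform_to_list : Prop := ∀ (string : String), Dom_transform_to_list string → Pre_transform_to_list string → Spec_transform_to_list string (transform_to_list string)

-- ===== LEMMAS AND PROOFS =====

-- a simple structural recursion computing s.split('|') for this single-character separator
def pvSplit : List Char → List (List Char)
  | [] => [[]]
  | c :: cs => if c = '|' then [] :: pvSplit cs
               else (c :: (pvSplit cs).headI) :: (pvSplit cs).tail

lemma pvSplit_ne_nil (l : List Char) : pvSplit l ≠ [] := by
  cases l with
  | nil => simp [pvSplit]
  | cons c cs => simp only [pvSplit]; split_ifs <;> simp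

lemma pvSplit_cons_head_tail (l : List Char) :
    (pvSplit l).headI :: (pvSplit l).tail = pvSplit l := by
  cases h : pvSplit l with
  | nil => exact absurd h (pvSplit_ne_nil l)
  | cons g gs => simp

lemma splitOn_go_eq (fuel : Nat) (l cur : List Char) (acc : List (List Char))
    (h : l.length < fuel) :
    PySem.Chars.splitOn.go ['|'] fuel l cur acc =
      acc.reverse ++ (cur.reverse ++ (pvSplit l).headI) :: (pvSplit l).tail := by
  induction fuel generalizing l cur acc with
  | zero => omega
  | succ n ih =>
    cases l with
    | nil => simp [PySem.Chars.splitOn.go, pvSplit]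
    | cons c cs =>
      by_cases hc : c = '|'
      · subst hc
        have hp : List.isPrefixOf ['|'] ('|' :: cs) = true := by simp [List.isPrefixOf]
        rw [show PySem.Chars.splitOn.go ['|'] (n+1) ('|' :: cs) cur acc =
              PySem.Chars.splitOn.go ['|'] n cs [] (cur.reverse :: acc) by
            simp [PySem.Chars.splitOn.go, hp]]
        rw [ih cs [] (cur.reverse :: acc) (by simpa using Nat.lt_of_succ_lt_succ h)]
        simp [pvSplit, pvSplit_cons_head_tail]
      · have hp : List.isPrefixOf ['|'] (c :: cs) = false := by
          simp [List.isPrefixOf, Ne.symm hc]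
        rw [show PySem.Chars.splitOn.go ['|'] (n+1) (c :: cs) cur acc =
              PySem.Chars.splitOn.go ['|'] n cs (c :: cur) acc by
            simp [PySem.Chars.splitOn.go, hp]]
        rw [ih cs (c :: cur) acc (by simpa using Nat.lt_of_succ_lt_succ h)]
        simp [pvSplit, hc]

lemma splitOn_eq_pvSplit (l : List Char) :
    PySem.Chars.splitOn l ['|'] = pvSplit l := by
  unfold PySem.Chars.splitOn
  rw [splitOn_go_eq (l.length + 1) l [] [] (by omega)]
  simp [pvSplit_cons_head_tail]

-- A's fold, characterised against pvSplit
lemma foldl_eq_split (cs : List Char) : ∀ (done : List (List Int)) (cur : List Int),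
    cs.foldl
      (fun result num =>
        if num ≠ '|' then result.dropLast ++ [result.getLastD [] ++ [pvIntOfChar num]]
        else result ++ [[]])
      (done ++ [cur]) =
      done ++ (cur ++ (pvSplit cs).headI.map pvIntOfChar) ::
        ((pvSplit cs).tail.map (fun p => p.map pvIntOfChar)) := by
  induction cs with
  | nil => intro done cur; simp [pvSplit]
  | cons c cs ih =>
    intro done cur
    by_cases hc : c = '|'
    · subst hc
      simp only [List.foldl_cons]
      rw [if_neg (by simp), show done ++ [cur] ++ [([] : List Int)] = (done ++ [cur]) ++ [[]] by simp, ih]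
      have := pvSplit_cons_head_tail cs
      simp only [pvSplit, if_pos trivial]
      rw [← this]
      simp
    · simp only [List.foldl_cons]
      rw [if_pos (by simp [hc]), show (done ++ [cur]).dropLast ++ [(done ++ [cur]).getLastD [] ++ [pvIntOfChar c]] =
            done ++ [cur ++ [pvIntOfChar c]] by simp, ih]
      simp [pvSplit, hc]

-- ===== VERDICT (by name: the statement is the Claim_ definition above) =====
theorem transform_to_list_spec : Claim_equal_transform_to_list := by
  intro s _ _
  show transform_to_list s = transform_to_list_alt s
  unfold transform_to_list transform_to_list_alt
  rw [splitOn_eq_pvSplit]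
  have h := foldl_eq_split s.toList [] []
  simp only [List.nil_append] at h
  rw [h, ← pvSplit_cons_head_tail s.toList]
  simp
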